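-- pv_equiv track=rewrite | github.com/VikParuchuri/pdf_to_md | pdf_to_md/post.py | remove_repeating_suffix
-- ===== SOURCE A (Python) =====
-- def find_repeating_suffix(s):
--     max_len = min((len(s) // 2 + 1, 500))
--     for size in range(1, max_len):
--         if s[-size:] == s[-2*size:-size]:
--             return s[-size:]
--     return None
--
-- def remove_repeating_suffix(s):
--     repeating_suffix = find_repeating_suffix(s)
--     if not repeating_suffix:
--         return s
--     while True:
--         if not s.endswith(repeating_suffix):
--             break
--         s = s[:-len(repeating_suffix)]
--     return s
-- ===== SOURCE B (Python) =====
-- def remove_repeating_suffix(s):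
--     n = len(s)
--     max_len = min(n // 2 + 1, 500)
--     p = 0
--     for size in range(1, max_len):
--         if s[n - size:] == s[n - 2 * size:n - size]:
--             p = size
--             break
--     if p == 0:
--         return s
--     # scan backwards over the p-shifted character run, then slice once
--     i = n - p - 1
--     while i >= 0 and s[i] == s[i + p]:
--         i -= 1
--     t = (n - p - 1) - i
--     k = t // p + 1
--     return s[:n - k * p]
-- ===== Notes on version B (the rewrite author's own statement) =====
-- stated objective: faster
-- what changed: A strips one suffix copy per while-iteration, rebuilding the string each round; B counts the aligned trailing copies with a single backward character scan and removes them all with one slice.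
import Mathlib
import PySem

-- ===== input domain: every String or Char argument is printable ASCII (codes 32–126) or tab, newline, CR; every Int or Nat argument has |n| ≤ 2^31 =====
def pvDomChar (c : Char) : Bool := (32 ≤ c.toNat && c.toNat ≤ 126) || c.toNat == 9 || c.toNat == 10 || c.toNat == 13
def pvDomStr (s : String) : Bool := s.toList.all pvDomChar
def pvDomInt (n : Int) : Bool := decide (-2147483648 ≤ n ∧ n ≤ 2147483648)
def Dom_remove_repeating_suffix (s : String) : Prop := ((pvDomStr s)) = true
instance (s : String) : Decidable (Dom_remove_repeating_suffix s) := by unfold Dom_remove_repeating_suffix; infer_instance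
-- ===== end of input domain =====

-- B replaces A's strip-one-copy-per-round while-loop (a fresh copy of the string each round)
-- by one backward character scan that counts the aligned trailing copies and slices once.

-- ===== PORT A =====
-- 'for size in range(1, max_len)' of find_repeating_suffix
def pvFindLoopA (cs : List Char) (size maxLen : Nat) : Option (List Char) :=
  if size < maxLen then
    if PySem.List.slice cs (some (-(size : Int))) none =
        PySem.List.slice cs (some (-(2 * (size : Int)))) (some (-(size : Int))) then
      some (PySem.List.slice cs (some (-(size : Int))) none)
    else pvFindLoopA cs (size + 1) maxLen
  else none
termination_by maxLen - size

-- find_repeating_suffix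
def pvFindA (cs : List Char) : Option (List Char) :=
  pvFindLoopA cs 1 (min (cs.length / 2 + 1) 500)

-- the 'while True' strip loop; the 'suf ≠ []' conjunct is only a totality guard
-- (the caller only passes nonempty suffixes, on which Python's loop terminates)
def pvStripA (cs suf : List Char) : List Char :=
  if h : suf ≠ [] ∧ PySem.Chars.endswith cs suf = true then
    pvStripA (PySem.List.slice cs none (some (-(suf.length : Int)))) suf
  else cs
termination_by cs.length
decreasing_by
  have hl : suf <:+ cs := (PySem.Chars.endswith_iff _ _).mp h.2
  have hle := hl.length_le
  have h0 : 0 < suf.length := List.length_pos_iff.mpr h.1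
  rw [PySem.List.slice_to_neg_natCast _ _ h0]
  simp only [List.length_take]
  omega

def remove_repeating_suffix (s : String) : String :=
  match pvFindA s.toList with
  | none => s
  | some suf => if suf = [] then s else String.ofList (pvStripA s.toList suf)

-- ===== PORT B =====
-- B's break-out 'for size' search loop, returning p (0 = no repeating suffix found)
def pvFindLoopB (cs : List Char) (n size maxLen : Nat) : Nat :=
  if size < maxLen then
    if PySem.List.slice cs (some ((n : Int) - size)) none =
        PySem.List.slice cs (some ((n : Int) - 2 * size)) (some ((n : Int) - size)) then size
    else pvFindLoopB cs n (size + 1) maxLen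
  else 0
termination_by maxLen - size

-- B's backward scan 'while i >= 0 and s[i] == s[i + p]: i -= 1', returning the final i
-- (the loop guard keeps both indices in range, so pyGetD's default is never used)
def pvRunB (cs : List Char) (p : Nat) (i : Int) : Int :=
  if h : 0 ≤ i ∧ PySem.List.pyGetD cs i ' ' = PySem.List.pyGetD cs (i + p) ' ' then
    pvRunB cs p (i - 1)
  else i
termination_by (i + 1).toNat
decreasing_by omega

def remove_repeating_suffix_alt (s : String) : String :=
  let cs := s.toList
  let n := cs.length
  let p := pvFindLoopB cs n 1 (min (n / 2 + 1) 500)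
  if p = 0 then s
  else
    let i := pvRunB cs p ((n : Int) - p - 1)
    let t := ((n : Int) - p - 1) - i
    let k := PySem.Int.floordiv t (p : Int) + 1
    String.ofList (PySem.List.slice cs none (some ((n : Int) - k * p)))

-- ===== PRECONDITION & SPEC =====
def Spec_remove_repeating_suffix (s : String) (out : String) : Prop := out = remove_repeating_suffix_alt s
instance (s : String) (out : String) : Decidable (Spec_remove_repeating_suffix s out) := by unfold Spec_remove_repeating_suffix; infer_instance

-- ===== CLAIM (what is proved, stated in full; the proofs are below) =====
def Claim_equal_remove_repeating_suffix : Prop := ∀ (s : String), Dom_remove_repeating_suffix s → Spec_remove_repeating_suffix s (remove_repeating_suffix s)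

-- ===== LEMMAS AND PROOFS =====

theorem pv_slice_negneg (xs : List Char) (k : Nat) (hk : 0 < k) (h : 2 * k ≤ xs.length) :
    PySem.List.slice xs (some (-(2 * (k : Int)))) (some (-(k : Int))) =
      (xs.drop (xs.length - 2 * k)).take k := by
  simp only [PySem.List.slice, PySem.List.clampIdx]
  split_ifs <;> try (exfalso; omega)
  have e1 : ((xs.length : Int) + -(2 * (k : Int))).toNat = xs.length - 2 * k := by omega
  have e2 : ((xs.length : Int) + -(k : Int)).toNat = xs.length - k := by omega
  rw [e1, e2]
  congr 1
  omega

theorem pv_loops_agree (cs : List Char) (size maxLen : Nat)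
    (h : maxLen ≤ cs.length / 2 + 1) (h1 : 1 ≤ size) :
    pvFindLoopA cs size maxLen =
      (if pvFindLoopB cs cs.length size maxLen = 0 then none
       else some (cs.drop (cs.length - pvFindLoopB cs cs.length size maxLen))) := by
  generalize hd : maxLen - size = d
  induction d generalizing size with
  | zero =>
    have hlt : ¬ size < maxLen := by omega
    rw [pvFindLoopA, pvFindLoopB]
    simp [hlt]
  | succ d ih =>
    have hlt : size < maxLen := by omega
    have hsz : 2 * size ≤ cs.length := by omega
    have hA1 : PySem.List.slice cs (some (-(size : Int))) none = cs.drop (cs.length - size) :=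
      PySem.List.slice_from_neg_natCast cs size (by omega)
    have hA2 := pv_slice_negneg cs size (by omega) hsz
    have hB1 : PySem.List.slice cs (some ((cs.length : Int) - size)) none
        = cs.drop (cs.length - size) := by
      rw [PySem.List.slice_from cs (by omega)]
      congr 1
      omega
    have hB2 : PySem.List.slice cs (some ((cs.length : Int) - 2 * size)) (some ((cs.length : Int) - size))
        = (cs.drop (cs.length - 2 * size)).take size := by
      rw [PySem.List.slice_toNat cs (a := (cs.length : Int) - 2 * size) (b := (cs.length : Int) - size) (by omega) (by omega)]
      have e1 : ((cs.length : Int) - 2 * size).toNat = cs.length - 2 * size := by omega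
      have e2 : ((cs.length : Int) - size).toNat = cs.length - size := by omega
      rw [e1, e2]
      congr 1
      omega
    rw [pvFindLoopA, pvFindLoopB]
    rw [if_pos hlt, if_pos hlt, hA1, hA2, hB1, hB2]
    by_cases hc : cs.drop (cs.length - size) = (cs.drop (cs.length - 2 * size)).take size
    · rw [if_pos hc, if_pos hc, if_neg (by omega : ¬ size = 0)]
    · rw [if_neg hc, if_neg hc]
      exact ih (size + 1) (by omega) (by omega)

theorem pv_findB_bounds (cs : List Char) (n size maxLen : Nat)
    (hp : pvFindLoopB cs n size maxLen ≠ 0) :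
    size ≤ pvFindLoopB cs n size maxLen ∧ pvFindLoopB cs n size maxLen < maxLen := by
  generalize hd : maxLen - size = d
  induction d generalizing size with
  | zero =>
    rw [pvFindLoopB] at hp ⊢
    have hlt : ¬ size < maxLen := by omega
    simp [hlt] at hp
  | succ d ih =>
    have hlt : size < maxLen := by omega
    rw [pvFindLoopB] at hp ⊢
    rw [if_pos hlt] at hp ⊢
    split_ifs with hc
    · omega
    · rw [if_neg hc] at hp
      have := ih (size + 1) hp (by omega)
      omega

theorem pv_run_spec (cs : List Char) (p : Nat) (i : Int) (hi : -1 ≤ i) :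
    -1 ≤ pvRunB cs p i ∧ pvRunB cs p i ≤ i ∧
      (∀ j : Int, pvRunB cs p i < j → j ≤ i →
        PySem.List.pyGetD cs j ' ' = PySem.List.pyGetD cs (j + p) ' ') ∧
      (0 ≤ pvRunB cs p i →
        PySem.List.pyGetD cs (pvRunB cs p i) ' ' ≠ PySem.List.pyGetD cs (pvRunB cs p i + p) ' ') := by
  generalize hd : (i + 1).toNat = d
  induction d generalizing i with
  | zero =>
    have hieq : i = -1 := by omega
    rw [pvRunB]
    have hng : ¬ (0 ≤ i ∧ PySem.List.pyGetD cs i ' ' = PySem.List.pyGetD cs (i + p) ' ') := by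
      rintro ⟨h0, -⟩; omega
    rw [dif_neg hng]
    refine ⟨hi, le_refl i, fun j hj1 hj2 => absurd (lt_of_lt_of_le hj1 hj2) (lt_irrefl i), fun h0 => absurd h0 (by omega)⟩
  | succ d ih =>
    rw [pvRunB]
    by_cases hc : 0 ≤ i ∧ PySem.List.pyGetD cs i ' ' = PySem.List.pyGetD cs (i + p) ' '
    · rw [dif_pos hc]
      have hrec := ih (i - 1) (by omega) (by omega)
      refine ⟨hrec.1, by omega, fun j hj1 hj2 => ?_, hrec.2.2.2⟩
      rcases (by omega : j ≤ i - 1 ∨ j = i) with hj | rfl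
      · exact hrec.2.2.1 j hj1 hj
      · exact hc.2
    · rw [dif_neg hc]
      push Not at hc
      exact ⟨hi, le_refl i, fun j hj1 hj2 => absurd (lt_of_lt_of_le hj1 hj2) (lt_irrefl i), hc⟩

theorem pv_getElem_congr (cs : List Char) (a b : Nat) (ha : a < cs.length) (hb : b < cs.length)
    (h : a = b) : cs[a] = cs[b] := by subst h; rfl

theorem pv_chain (cs : List Char) (p t : Nat) (hp : 0 < p) (ht : t ≤ cs.length - p)
    (hrun : ∀ m : Nat, cs.length - p - t ≤ m → m < cs.length - p →
      (hm : m + p < cs.length) → cs[m]'(by omega) = cs[m + p]) :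
    ∀ j : Nat, 1 ≤ j → (j - 1) * p ≤ t → j * p ≤ cs.length →
      (cs.drop (cs.length - j * p)).take p = cs.drop (cs.length - p) := by
  intro j
  induction j with
  | zero => omega
  | succ j ih =>
    intro _ h2 h3
    have hsm : (j + 1) * p = j * p + p := Nat.succ_mul j p
    simp only [Nat.add_sub_cancel] at h2
    by_cases hj0 : j = 0
    · subst hj0
      rw [show cs.length - 1 * p = cs.length - p by omega]
      exact List.take_of_length_le (by rw [List.length_drop]; omega)
    · have h1j : 1 ≤ j := by omega
      have hsm' : j * p = (j - 1) * p + p := by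
        conv_lhs => rw [show j = (j - 1) + 1 by omega]
        exact Nat.succ_mul _ _
      have hIH := ih h1j (by omega) (by omega)
      rw [← hIH]
      apply List.ext_getElem
      · simp only [List.length_take, List.length_drop]; omega
      · intro i h₁ h₂
        simp only [List.length_take, List.length_drop] at h₁
        have hip : i < p := by omega
        simp only [List.getElem_take, List.getElem_drop]
        calc cs[cs.length - (j+1)*p + i]'(by omega)
            = cs[cs.length - (j+1)*p + i + p]'(by omega) :=
              hrun (cs.length - (j+1)*p + i) (by omega) (by omega) (by omega)
          _ = cs[cs.length - j*p + i]'(by omega) :=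
              pv_getElem_congr cs _ _ (by omega) (by omega) (by omega)

theorem pv_endswith_take (cs : List Char) (p m : Nat) (hp : 0 < p) (hpm : p ≤ m)
    (hmn : m ≤ cs.length) :
    (PySem.Chars.endswith (cs.take m) (cs.drop (cs.length - p)) = true) ↔
      (cs.drop (m - p)).take p = cs.drop (cs.length - p) := by
  have hlen : (cs.drop (cs.length - p)).length = p := by rw [List.length_drop]; omega
  rw [PySem.Chars.endswith_iff, List.suffix_iff_eq_drop, hlen, List.length_take,
    show min m cs.length = m by omega, List.drop_take, show m - (m - p) = p by omega]
  exact eq_comm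

theorem pv_suf_ne (cs : List Char) (p : Nat) (hp : 0 < p) (hpn : p ≤ cs.length) :
    cs.drop (cs.length - p) ≠ [] := by
  intro h
  have := congrArg List.length h
  rw [List.length_drop] at this
  simp at this
  omega

theorem pv_strip_step (cs : List Char) (p t : Nat) (hp : 0 < p) (hpn : p ≤ cs.length)
    (ht : t ≤ cs.length - p)
    (hrun : ∀ m : Nat, cs.length - p - t ≤ m → m < cs.length - p →
      (hm : m + p < cs.length) → cs[m]'(by omega) = cs[m + p])
    (q : Nat) (hqt : q * p ≤ t) :
    pvStripA (cs.take (cs.length - q * p)) (cs.drop (cs.length - p)) =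
      pvStripA (cs.take (cs.length - (q + 1) * p)) (cs.drop (cs.length - p)) := by
  have hsm : (q + 1) * p = q * p + p := Nat.succ_mul q p
  have hends : PySem.Chars.endswith (cs.take (cs.length - q * p)) (cs.drop (cs.length - p)) = true := by
    rw [pv_endswith_take cs p (cs.length - q * p) hp (by omega) (by omega)]
    rw [show cs.length - q * p - p = cs.length - (q + 1) * p by omega]
    exact pv_chain cs p t hp ht hrun (q + 1) (by omega) (by simpa using hqt) (by omega)
  rw [pvStripA, dif_pos ⟨pv_suf_ne cs p hp hpn, hends⟩]
  have hlen : (cs.drop (cs.length - p)).length = p := by rw [List.length_drop]; omega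
  rw [hlen, PySem.List.slice_to_neg_natCast _ p hp]
  simp only [List.length_take, List.take_take]
  rw [show min (min (cs.length - q * p) cs.length - p) (cs.length - q * p)
      = cs.length - (q + 1) * p by omega]

theorem pv_strip_stop (cs : List Char) (p t : Nat) (hp : 0 < p) (hpn : p ≤ cs.length)
    (ht : t ≤ cs.length - p)
    (hrun : ∀ m : Nat, cs.length - p - t ≤ m → m < cs.length - p →
      (hm : m + p < cs.length) → cs[m]'(by omega) = cs[m + p])
    (hmis : t < cs.length - p →
      cs[cs.length - p - 1 - t]'(by omega) ≠ cs[cs.length - 1 - t]'(by omega)) :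
    pvStripA (cs.take (cs.length - (t / p + 1) * p)) (cs.drop (cs.length - p)) =
      cs.take (cs.length - (t / p + 1) * p) := by
  have hK : (t / p + 1) * p = t / p * p + p := Nat.succ_mul _ _
  have hdm : t / p * p ≤ t := Nat.div_mul_le_self t p
  have htK : t < (t / p + 1) * p := by
    have h1 := Nat.div_add_mod t p
    have h2 : t % p < p := Nat.mod_lt t hp
    have h3 : p * (t / p) = t / p * p := Nat.mul_comm _ _
    omega
  generalize hKg : t / p = K at hK hdm htK ⊢
  rw [pvStripA]
  apply dif_neg
  rintro ⟨-, hends⟩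
  by_cases hcase : p ≤ cs.length - (K + 1) * p
  · have hblk := (pv_endswith_take cs p (cs.length - (K + 1) * p) hp hcase (by omega)).mp hends
    have hchain := pv_chain cs p t hp ht hrun (K + 1) (by omega) (by simpa using hdm) (by omega)
    have htlt : t < cs.length - p := by omega
    have hx := hmis htlt
    apply hx
    have heq : (cs.drop (cs.length - (K + 1) * p - p)).take p
        = (cs.drop (cs.length - (K + 1) * p)).take p := hblk.trans hchain.symm
    have hi : cs.length - p - 1 - t - (cs.length - (K + 1) * p - p) < p := by omega
    have h₁ : cs.length - p - 1 - t - (cs.length - (K + 1) * p - p)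
        < ((cs.drop (cs.length - (K + 1) * p - p)).take p).length := by
      simp only [List.length_take, List.length_drop]; omega
    have hel := List.getElem_of_eq heq h₁
    simp only [List.getElem_take, List.getElem_drop] at hel
    calc cs[cs.length - p - 1 - t]'(by omega)
        = cs[cs.length - (K + 1) * p - p + (cs.length - p - 1 - t - (cs.length - (K + 1) * p - p))]'(by omega) :=
          pv_getElem_congr cs _ _ (by omega) (by omega) (by omega)
      _ = cs[cs.length - (K + 1) * p + (cs.length - p - 1 - t - (cs.length - (K + 1) * p - p))]'(by omega) := hel
      _ = cs[cs.length - 1 - t]'(by omega) :=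
          pv_getElem_congr cs _ _ (by omega) (by omega) (by omega)
  · have hsfx := (PySem.Chars.endswith_iff _ _).mp hends
    have hle := hsfx.length_le
    rw [List.length_drop, List.length_take] at hle
    omega

theorem pv_strip_eq (cs : List Char) (p t : Nat) (hp : 0 < p) (hpn : p ≤ cs.length)
    (ht : t ≤ cs.length - p)
    (hrun : ∀ m : Nat, cs.length - p - t ≤ m → m < cs.length - p →
      (hm : m + p < cs.length) → cs[m]'(by omega) = cs[m + p])
    (hmis : t < cs.length - p →
      cs[cs.length - p - 1 - t]'(by omega) ≠ cs[cs.length - 1 - t]'(by omega)) :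
    ∀ q : Nat, q * p ≤ t →
      pvStripA (cs.take (cs.length - q * p)) (cs.drop (cs.length - p)) =
        cs.take (cs.length - (t / p + 1) * p) := by
  intro q
  generalize hd : t / p - q = d
  induction d generalizing q with
  | zero =>
    intro hqt
    have hqle : q ≤ t / p := (Nat.le_div_iff_mul_le hp).mpr hqt
    have hq : q = t / p := by omega
    subst hq
    rw [pv_strip_step cs p t hp hpn ht hrun (t / p) hqt]
    exact pv_strip_stop cs p t hp hpn ht hrun hmis
  | succ d ih =>
    intro hqt
    have hqle : q ≤ t / p := (Nat.le_div_iff_mul_le hp).mpr hqt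
    have hlt : q + 1 ≤ t / p := by omega
    have hq1t : (q + 1) * p ≤ t := (Nat.le_div_iff_mul_le hp).mp hlt
    rw [pv_strip_step cs p t hp hpn ht hrun q hqt]
    exact ih (q + 1) (by omega) hq1t


theorem pv_main (s : String) : remove_repeating_suffix s = remove_repeating_suffix_alt s := by
  unfold remove_repeating_suffix remove_repeating_suffix_alt pvFindA
  have hml : min (s.toList.length / 2 + 1) 500 ≤ s.toList.length / 2 + 1 := min_le_left _ _
  have hagree := pv_loops_agree s.toList 1 (min (s.toList.length / 2 + 1) 500) hml (le_refl 1)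
  by_cases hp0 : pvFindLoopB s.toList s.toList.length 1 (min (s.toList.length / 2 + 1) 500) = 0
  · rw [hagree, if_pos hp0]
    rw [if_pos hp0]
  · obtain ⟨hp1, hpm⟩ := pv_findB_bounds s.toList s.toList.length 1 (min (s.toList.length / 2 + 1) 500) hp0
    rw [hagree, if_neg hp0]
    simp only [if_neg hp0]
    set cs := s.toList
    set n := cs.length with hn
    set p := pvFindLoopB cs n 1 (min (n / 2 + 1) 500) with hpdef
    have h2p : 2 * p ≤ n := by omega
    have hp : 0 < p := by omega
    have hpn : p ≤ n := by omega
    rw [if_neg (pv_suf_ne cs p hp hpn)]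
    set i_f := pvRunB cs p ((n : Int) - p - 1) with hif
    obtain ⟨hrf1, hrf2, hrf3, hrf4⟩ := pv_run_spec cs p ((n : Int) - p - 1) (by omega)
    set tN := (((n : Int) - p - 1) - i_f).toNat with htNdef
    have htI : ((n : Int) - p - 1) - i_f = (tN : Int) := by omega
    have ht : tN ≤ n - p := by omega
    have hrunN : ∀ m : Nat, n - p - tN ≤ m → m < n - p →
        (hm : m + p < n) → cs[m]'(by omega) = cs[m + p] := by
      intro m h1 h2 hm
      have hstep := hrf3 (m : Int) (by omega) (by omega)
      rw [PySem.List.pyGetD_eq_getElem cs (i := (m : Int)) ' ' (by omega) (by omega),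
          PySem.List.pyGetD_eq_getElem cs (i := (m : Int) + p) ' ' (by omega) (by omega)] at hstep
      calc cs[m]'(by omega) = cs[((m : Int)).toNat]'(by omega) :=
            pv_getElem_congr cs _ _ (by omega) (by omega) (by omega)
        _ = cs[((m : Int) + p).toNat]'(by omega) := hstep
        _ = cs[m + p]'(by omega) := pv_getElem_congr cs _ _ (by omega) (by omega) (by omega)
    have hmisN : tN < n - p →
        cs[n - p - 1 - tN]'(by omega) ≠ cs[n - 1 - tN]'(by omega) := by
      intro hlt heq
      have h0f : 0 ≤ i_f := by omega
      apply hrf4 h0f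
      rw [PySem.List.pyGetD_eq_getElem cs (i := i_f) ' ' h0f (by omega),
          PySem.List.pyGetD_eq_getElem cs (i := i_f + p) ' ' (by omega) (by omega)]
      calc cs[i_f.toNat]'(by omega) = cs[n - p - 1 - tN]'(by omega) :=
            pv_getElem_congr cs _ _ (by omega) (by omega) (by omega)
        _ = cs[n - 1 - tN]'(by omega) := heq
        _ = cs[(i_f + p).toNat]'(by omega) := pv_getElem_congr cs _ _ (by omega) (by omega) (by omega)
    have hstrip := pv_strip_eq cs p tN hp hpn ht hrunN hmisN 0 (by simp)
    rw [show cs.take (cs.length - 0 * p) = cs by simp] at hstrip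
    rw [hstrip]
    have hfd : PySem.Int.floordiv ((n : Int) - p - 1 - i_f) (p : Int) = ((tN / p : Nat) : Int) := by
      rw [show (n : Int) - p - 1 - i_f = (tN : Int) from htI,
        PySem.Int.floordiv_eq_iff_of_pos (by exact_mod_cast hp)]
      constructor
      · exact_mod_cast Nat.div_mul_le_self tN p
      · have h1 := Nat.div_add_mod tN p
        have h2 : tN % p < p := Nat.mod_lt tN hp
        have h3 : (tN / p + 1) * p = tN / p * p + p := Nat.succ_mul _ _
        have h4 : p * (tN / p) = tN / p * p := Nat.mul_comm _ _
        exact_mod_cast (by omega : tN < (tN / p + 1) * p)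
    have h3 : (tN / p + 1) * p = tN / p * p + p := Nat.succ_mul _ _
    have hdm : tN / p * p ≤ tN := Nat.div_mul_le_self tN p
    have hle : (tN / p + 1) * p ≤ n := by omega
    have hc : (n : Int) - (((tN / p : Nat) : Int) + 1) * (p : Int) = ((n - (tN / p + 1) * p : Nat) : Int) := by
      rw [Nat.cast_sub hle]
      push_cast
      ring
    rw [hfd, hc, PySem.List.slice_to cs (Int.natCast_nonneg _)]
    rw [Int.toNat_natCast]

-- ===== VERDICT (by name: the statement is the Claim_ definition above) =====
theorem remove_repeating_suffix_spec : Claim_equal_remove_repeating_suffix := by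
  intro s _
  exact pv_main s
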